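-- pv_equiv track=rewrite | github.com/GauriDevWork/acf-automation-tool | parser/grouper.py | group_sections
-- ===== SOURCE A (Python) =====
-- def group_sections(raw_structure):
--     """
--     Walks the raw paragraph list from extract_raw_structure().
--     Splits into sections every time a Heading 1 is encountered.
--     Returns a dict: {section_name: [list of paragraph dicts]}
--     Skips any paragraphs before the first Heading 1 (cover page content).
--     """
--     sections = {}
--     current_section = None
--
--     for item in raw_structure:
--         if item["style"] == "Heading 1":
--             current_section = item["text"]
--             sections[current_section] = []
--         elif current_section is not None:
--             sections[current_section].append(item)
--
--     return sections
-- ===== SOURCE B (Python) =====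
-- def group_sections(raw_structure):
--     heads = [(i, item["text"]) for i, item in enumerate(raw_structure)
--              if item["style"] == "Heading 1"]
--     sections = {}
--     for k in range(len(heads)):
--         i, name = heads[k]
--         end = heads[k + 1][0] if k + 1 < len(heads) else len(raw_structure)
--         sections[name] = raw_structure[i + 1:end]
--     return sections
-- ===== Notes on version B (the rewrite author's own statement) =====
-- stated objective: alternative
-- what changed: replaces the single stateful pass (current-section accumulator with per-item appends) by a two-pass index scheme: first collect the positions and texts of all Heading 1 items, then assign each section the slice of raw_structure between that heading and the next one
import Mathlib
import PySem

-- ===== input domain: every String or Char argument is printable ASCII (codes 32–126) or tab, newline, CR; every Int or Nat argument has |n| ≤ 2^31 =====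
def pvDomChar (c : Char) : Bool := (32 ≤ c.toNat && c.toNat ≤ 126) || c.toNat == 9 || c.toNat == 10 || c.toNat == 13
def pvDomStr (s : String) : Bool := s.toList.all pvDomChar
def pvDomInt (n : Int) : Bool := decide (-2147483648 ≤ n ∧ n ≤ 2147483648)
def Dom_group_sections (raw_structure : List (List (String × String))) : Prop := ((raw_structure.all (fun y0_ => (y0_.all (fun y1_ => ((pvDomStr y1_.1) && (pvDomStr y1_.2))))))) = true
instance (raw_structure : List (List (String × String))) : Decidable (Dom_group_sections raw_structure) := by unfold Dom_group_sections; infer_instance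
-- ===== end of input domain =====

-- B groups by a two-pass index scheme (collect Heading 1 positions, then slice between
-- consecutive headings) instead of A's single stateful pass; return values are equal.

-- ===== PORT A =====
-- the loop body of A: dict of sections + optional current section name
def gsStep (st : PySem.Dict String (List (List (String × String))) × Option String)
    (item : List (String × String)) :
    PySem.Dict String (List (List (String × String))) × Option String :=
  if (PySem.Dict.mk item).getD "style" "" = "Heading 1" then
    (st.1.insert ((PySem.Dict.mk item).getD "text" "") [],
     some ((PySem.Dict.mk item).getD "text" ""))
  else
    match st.2 with
    | none => st
    -- sections[current_section].append(item); under Pre_ the key is always present,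
    -- where modify (= d[c] = d.get(c, []) + [item]) coincides with Python's append
    | some c => (st.1.modify c [] (fun l => l ++ [item]), some c)

def group_sections (raw_structure : List (List (String × String))) :
    List (String × List (List (String × String))) :=
  (raw_structure.foldl gsStep (PySem.Dict.empty, none)).1.items

-- ===== PORT B =====
-- heads = [(i, item["text"]) for i, item in enumerate(raw_structure) if item["style"] == "Heading 1"]
def gsHeads (raw_structure : List (List (String × String))) : List (Int × String) :=
  (PySem.List.enumerate raw_structure 0).filterMap
    (fun p => if (PySem.Dict.mk p.2).getD "style" "" = "Heading 1"
              then some (p.1, (PySem.Dict.mk p.2).getD "text" "") else none)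

-- for k in range(len(heads)): sections[name] = raw_structure[i+1:end]
def gsAssign (raw : List (List (String × String))) :
    List (Int × String) → PySem.Dict String (List (List (String × String))) →
    PySem.Dict String (List (List (String × String)))
  | [], d => d
  | (i, name) :: rest, d =>
      gsAssign raw rest (d.insert name (PySem.List.slice raw (some (i + 1))
        (some (match rest with | (j, _) :: _ => j | [] => (raw.length : Int)))))

def group_sections_alt (raw_structure : List (List (String × String))) :
    List (String × List (List (String × String))) :=
  (gsAssign raw_structure (gsHeads raw_structure) PySem.Dict.empty).items

-- ===== PRECONDITION & SPEC =====
-- Pre_ excludes exactly the inputs where the Python raises KeyError: an item without a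
-- "style" key, or a Heading 1 item without a "text" key.
def Pre_group_sections (raw_structure : List (List (String × String))) : Prop :=
  ∀ item ∈ raw_structure,
    (PySem.Dict.mk item).contains "style" = true ∧
    ((PySem.Dict.mk item).getD "style" "" = "Heading 1" →
      (PySem.Dict.mk item).contains "text" = true)
instance (raw_structure : List (List (String × String))) : Decidable (Pre_group_sections raw_structure) := by
  unfold Pre_group_sections; infer_instance

def pvWitness_group_sections : (List (List (String × String))) :=
  [[("style", "Heading 1"), ("text", "Intro")],
   [("style", "Normal"), ("text", "body")]]

def Spec_group_sections (raw_structure : List (List (String × String))) (out : List (String × List (List (String × String)))) : Prop := out = group_sections_alt raw_structure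
instance (raw_structure : List (List (String × String))) (out : List (String × List (List (String × String)))) : Decidable (Spec_group_sections raw_structure out) := by unfold Spec_group_sections; infer_instance

-- ===== CLAIM (what is proved, stated in full; the proofs are below) =====
def Claim_equal_group_sections : Prop := ∀ (raw_structure : List (List (String × String))), Dom_group_sections raw_structure → Pre_group_sections raw_structure → Spec_group_sections raw_structure (group_sections raw_structure)

-- ===== LEMMAS AND PROOFS =====

def gsIsHead (it : List (String × String)) : Bool :=
  (PySem.Dict.mk it).getD "style" "" == "Heading 1"

def gsText (it : List (String × String)) : String :=
  (PySem.Dict.mk it).getD "text" ""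

-- positions (as Nat) and texts of the Heading 1 items of l, indices starting at n
def gsHeadsN (n : Nat) : List (List (String × String)) → List (Nat × String)
  | [] => []
  | it :: rest =>
      if gsIsHead it then (n, gsText it) :: gsHeadsN (n + 1) rest
      else gsHeadsN (n + 1) rest

def gsCast (hs : List (Nat × String)) : List (Int × String) :=
  hs.map (fun p => ((p.1 : Int), p.2))

theorem gsHeads_eq_aux (l : List (List (String × String))) (s : Nat) :
    (PySem.List.enumerate l ((s : Nat) : Int)).filterMap
      (fun p => if (PySem.Dict.mk p.2).getD "style" "" = "Heading 1"
                then some (p.1, (PySem.Dict.mk p.2).getD "text" "") else none)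
    = gsCast (gsHeadsN s l) := by
  induction l generalizing s with
  | nil => simp [PySem.List.enumerate_nil, gsHeadsN, gsCast]
  | cons it rest ih =>
    rw [PySem.List.enumerate_cons]
    have : ((s : Int) + 1) = (((s + 1 : Nat)) : Int) := by push_cast; ring
    rw [List.filterMap_cons, this, ih (s + 1)]
    by_cases h : (PySem.Dict.mk it).getD "style" "" = "Heading 1"
    · simp [gsHeadsN, gsIsHead, gsText, gsCast, h]
    · simp [gsHeadsN, gsIsHead, gsCast, h]

theorem gsHeadsN_ge (l : List (List (String × String))) (m : Nat) :
    ∀ p ∈ gsHeadsN m l, m ≤ p.1 := by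
  induction l generalizing m with
  | nil => simp [gsHeadsN]
  | cons it rest ih =>
    intro p hp
    unfold gsHeadsN at hp
    by_cases h : gsIsHead it
    · simp [h] at hp
      rcases hp with rfl | hp
      · simp
      · exact Nat.le_of_succ_le (ih (m+1) p hp)
    · simp [h] at hp
      exact Nat.le_of_succ_le (ih (m+1) p hp)

theorem gsSlice_eq (raw : List (List (String × String)))
    (l : List (List (String × String))) (m : Nat) (h : raw.drop m = l) :
    PySem.List.slice raw (some ((m : Nat) : Int))
      (some (match gsCast (gsHeadsN m l) with
             | (j, _) :: _ => j
             | [] => (raw.length : Int)))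
    = l.takeWhile (fun it => !gsIsHead it) := by
  induction l generalizing m with
  | nil =>
    simp only [gsHeadsN, gsCast, List.map_nil]
    rw [PySem.List.slice_natCast]
    simp [h]
  | cons it rest ih =>
    have hlt : m < raw.length := by
      by_contra hc
      have : raw.drop m = [] := List.drop_eq_nil_of_le (by omega)
      rw [h] at this; simp at this
    have h' : raw.drop (m + 1) = rest := by
      rw [← List.tail_drop, h]; rfl
    by_cases hh : gsIsHead it
    · rw [show gsHeadsN m (it :: rest) = (m, gsText it) :: gsHeadsN (m+1) rest from by
        simp [gsHeadsN, hh]]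
      simp only [gsCast, List.map_cons]
      rw [PySem.List.slice_natCast]
      simp [hh]
    · rw [show gsHeadsN m (it :: rest) = gsHeadsN (m+1) rest from by simp [gsHeadsN, hh]]
      obtain ⟨eN, heN, hge⟩ : ∃ eN : Nat,
          (match gsCast (gsHeadsN (m+1) rest) with
           | (j, _) :: _ => j
           | [] => (raw.length : Int)) = (eN : Int) ∧ m + 1 ≤ eN := by
        cases heq : gsHeadsN (m+1) rest with
        | nil => exact ⟨raw.length, by simp [gsCast], by omega⟩
        | cons p tl =>
          refine ⟨p.1, ?_, ?_⟩
          · cases p; simp [gsCast]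
          · exact gsHeadsN_ge rest (m+1) p (by rw [heq]; exact List.mem_cons_self ..)
      have ihh := ih (m+1) h'
      rw [heN] at ihh ⊢
      rw [PySem.List.slice_natCast] at ihh ⊢
      rw [h, h'] at *
      rw [show eN - m = (eN - (m+1)) + 1 from by omega]
      simp only [List.take_succ_cons]
      rw [ihh]
      simp [hh]

theorem gsMain_some (raw : List (List (String × String)))
    (l : List (List (String × String))) (n : Nat) (h : raw.drop n = l)
    (d : PySem.Dict String (List (List (String × String)))) (c : String)
    (v : List (List (String × String))) :
    (l.foldl gsStep (d.insert c v, some c)).1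
    = gsAssign raw (gsCast (gsHeadsN n l))
        (d.insert c (v ++ l.takeWhile (fun it => !gsIsHead it))) := by
  induction l generalizing n d c v with
  | nil => simp [gsHeadsN, gsCast, gsAssign]
  | cons it rest ih =>
    have h' : raw.drop (n + 1) = rest := by rw [← List.tail_drop, h]; rfl
    rw [List.foldl_cons]
    by_cases hh : (PySem.Dict.mk it).getD "style" "" = "Heading 1"
    · have hstep : gsStep (d.insert c v, some c) it
          = ((d.insert c v).insert (gsText it) [], some (gsText it)) := by
        simp [gsStep, gsText, hh]
      rw [hstep, ih (n+1) h' (d.insert c v) (gsText it) []]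
      rw [show gsHeadsN n (it :: rest) = (n, gsText it) :: gsHeadsN (n+1) rest from by
        simp [gsHeadsN, gsIsHead, hh]]
      simp only [gsCast, List.map_cons]
      rw [show ∀ i name rest d, gsAssign raw ((i, name) :: rest) d = gsAssign raw rest (d.insert name (PySem.List.slice raw (some (i + 1)) (some (match rest with | (j, _) :: _ => j | [] => (raw.length : Int))))) from fun _ _ _ _ => rfl]
      rw [show ((n : Int) + 1) = (((n + 1 : Nat)) : Int) from by push_cast; ring]
      have hs := gsSlice_eq raw rest (n+1) h'
      simp only [gsCast] at hs
      rw [hs]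
      rw [show List.takeWhile (fun it => !gsIsHead it) (it :: rest) = [] from by
        simp [gsIsHead, hh]]
      simp
    · have hstep : gsStep (d.insert c v, some c) it
          = (d.insert c (v ++ [it]), some c) := by
        simp [gsStep, hh, PySem.Dict.modify, PySem.Dict.getD_insert_self,
          PySem.Dict.insert_insert_self]
      rw [hstep, ih (n+1) h' d c (v ++ [it])]
      rw [show gsHeadsN n (it :: rest) = gsHeadsN (n+1) rest from by
        simp [gsHeadsN, gsIsHead, hh]]
      rw [show List.takeWhile (fun it => !gsIsHead it) (it :: rest)
            = it :: List.takeWhile (fun it => !gsIsHead it) rest from by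
        simp [gsIsHead, hh]]
      simp

theorem gsMain_none (raw : List (List (String × String)))
    (l : List (List (String × String))) (n : Nat) (h : raw.drop n = l)
    (d : PySem.Dict String (List (List (String × String)))) :
    (l.foldl gsStep (d, none)).1 = gsAssign raw (gsCast (gsHeadsN n l)) d := by
  induction l generalizing n d with
  | nil => simp [gsHeadsN, gsCast, gsAssign]
  | cons it rest ih =>
    have h' : raw.drop (n + 1) = rest := by rw [← List.tail_drop, h]; rfl
    rw [List.foldl_cons]
    by_cases hh : (PySem.Dict.mk it).getD "style" "" = "Heading 1"
    · have hstep : gsStep (d, none) it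
          = (d.insert (gsText it) [], some (gsText it)) := by
        simp [gsStep, gsText, hh]
      rw [hstep, gsMain_some raw rest (n+1) h' d (gsText it) []]
      rw [show gsHeadsN n (it :: rest) = (n, gsText it) :: gsHeadsN (n+1) rest from by
        simp [gsHeadsN, gsIsHead, hh]]
      simp only [gsCast, List.map_cons]
      rw [show ∀ i name rest d, gsAssign raw ((i, name) :: rest) d = gsAssign raw rest (d.insert name (PySem.List.slice raw (some (i + 1)) (some (match rest with | (j, _) :: _ => j | [] => (raw.length : Int))))) from fun _ _ _ _ => rfl]
      rw [show ((n : Int) + 1) = (((n + 1 : Nat)) : Int) from by push_cast; ring]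
      have hs := gsSlice_eq raw rest (n+1) h'
      simp only [gsCast] at hs
      rw [hs]
      simp
    · have hstep : gsStep (d, none) it = (d, none) := by simp [gsStep, hh]
      rw [hstep, ih (n+1) h' d]
      rw [show gsHeadsN n (it :: rest) = gsHeadsN (n+1) rest from by
        simp [gsHeadsN, gsIsHead, hh]]

theorem gsHeads_eq (raw : List (List (String × String))) :
    gsHeads raw = gsCast (gsHeadsN 0 raw) := by
  have h := gsHeads_eq_aux raw 0
  simpa [gsHeads] using h

-- ===== VERDICT (by name: the statement is the Claim_ definition above) =====
theorem group_sections_spec : Claim_equal_group_sections := by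
  intro raw _ _
  unfold Spec_group_sections group_sections group_sections_alt
  rw [gsHeads_eq, ← gsMain_none raw raw 0 (by simp) PySem.Dict.empty]
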